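-- pv_equiv track=rewrite | github.com/sinri/nehushtan | nehushtan/mysql/MySQLKit.py | quote_string_offline
-- ===== SOURCE A (Python) =====
-- def quote_string_offline(value: str) -> str:
--     """
--     脱机转义字符串。
--     :param value:
--     :return: 包含了外层引号
--     """
--     d = {
--         '\\': '\\\\',
--         '\0': '\\0',
--         '\n': '\\n',
--         '\r': '\\r',
--         "'": "\\'",
--         '"': '\\"',
--         '\x1a': '\\Z',
--     }
--     s = value
--     for k, v in d.items():
--         s = s.replace(k, v)
--
--     return f"'{s}'"
-- ===== SOURCE B (Python) =====
-- def quote_string_offline(value: str) -> str: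
--     """
--     脱机转义字符串。Single-pass table-driven rewrite: one scan over the input,
--     each character replaced via the escape dict, instead of seven whole-string
--     replace passes.
--     """
--     d = {
--         '\\': '\\\\',
--         '\0': '\\0',
--         '\n': '\\n',
--         '\r': '\\r',
--         "'": "\\'",
--         '"': '\\"',
--         '\x1a': '\\Z',
--     }
--     return "'" + ''.join(d.get(ch, ch) for ch in value) + "'"
-- ===== Notes on version B (the rewrite author's own statement) =====
-- stated objective: alternative
-- what changed: Replaces seven sequential whole-string str.replace passes with a single table-driven scan that maps each character through the escape dict and joins once; asymptotically one pass instead of seven, though CPython's C-level replace makes A faster in wall clock.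
import Mathlib
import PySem

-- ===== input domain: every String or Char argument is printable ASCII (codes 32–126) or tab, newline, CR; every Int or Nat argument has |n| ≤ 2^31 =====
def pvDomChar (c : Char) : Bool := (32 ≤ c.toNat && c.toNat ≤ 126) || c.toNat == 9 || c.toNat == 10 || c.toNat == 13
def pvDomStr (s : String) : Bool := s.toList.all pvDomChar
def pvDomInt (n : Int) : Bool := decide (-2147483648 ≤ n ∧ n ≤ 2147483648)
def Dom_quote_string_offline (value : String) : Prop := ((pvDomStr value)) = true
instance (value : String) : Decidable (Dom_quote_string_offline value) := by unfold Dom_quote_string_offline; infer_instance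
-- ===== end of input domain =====

-- B replaces A's seven sequential whole-string replace passes by one table-driven
-- scan over the characters (dict lookup per char, one join); same return value.
-- (Not claimed faster: CPython's C-level str.replace beats a Python-level char loop.)

-- ===== PORT A =====
-- the escape dict d of A, in insertion order
def qsoDictA : PySem.Dict String String :=
  PySem.Dict.ofList
    [ ("\\", "\\\\")
    , (String.ofList [Char.ofNat 0], "\\0")
    , ("\n", "\\n")
    , ("\r", "\\r")
    , ("'", "\\'")
    , ("\"", "\\\"")
    , (String.ofList [Char.ofNat 26], "\\Z") ]

def quote_string_offline (value : String) : String :=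
  let s := (PySem.Dict.items qsoDictA).foldl
    (fun s kv => PySem.Str.replace s kv.1 kv.2) value
  "'" ++ s ++ "'"

-- ===== PORT B =====
-- the same escape dict, keyed by the single character
def qsoDictB : PySem.Dict Char String :=
  PySem.Dict.ofList
    [ ('\\', "\\\\")
    , (Char.ofNat 0, "\\0")
    , ('\n', "\\n")
    , ('\r', "\\r")
    , ('\'', "\\'")
    , ('"', "\\\"")
    , (Char.ofNat 26, "\\Z") ]

def quote_string_offline_alt (value : String) : String :=
  "'" ++ PySem.Str.join ""
    (value.toList.map (fun ch => (PySem.Dict.get? qsoDictB ch).getD (String.ofList [ch]))) ++ "'"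

-- ===== PRECONDITION & SPEC =====
def Spec_quote_string_offline (value : String) (out : String) : Prop := out = quote_string_offline_alt value
instance (value : String) (out : String) : Decidable (Spec_quote_string_offline value out) := by unfold Spec_quote_string_offline; infer_instance

-- ===== CLAIM (what is proved, stated in full; the proofs are below) =====
def Claim_equal_quote_string_offline : Prop := ∀ (value : String), Dom_quote_string_offline value → Spec_quote_string_offline value (quote_string_offline value)

-- ===== LEMMAS AND PROOFS =====

-- the fused per-character escape table (proof helper)
def qsoEsc (c : Char) : List Char :=
  if c = '\\' then ['\\', '\\']
  else if c = Char.ofNat 0 then ['\\', '0']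
  else if c = '\n' then ['\\', 'n']
  else if c = '\r' then ['\\', 'r']
  else if c = '\'' then ['\\', '\'']
  else if c = '"' then ['\\', '"']
  else if c = Char.ofNat 26 then ['\\', 'Z']
  else [c]

-- single-character pattern: replace is a flatMap
lemma qso_go_single (k : Char) (v : List Char) :
    ∀ (fuel : Nat) (l acc : List Char), l.length ≤ fuel →
      PySem.Chars.replace.go [k] v fuel l acc
        = acc.reverse ++ l.flatMap (fun c => if c = k then v else [c]) := by
  intro fuel
  induction fuel with
  | zero =>
      intro l acc h
      have hl : l = [] := List.eq_nil_of_length_eq_zero (Nat.le_zero.mp h)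
      subst hl
      simp [PySem.Chars.replace.go]
  | succ n ih =>
      intro l acc h
      cases l with
      | nil => simp [PySem.Chars.replace.go]
      | cons c t =>
          by_cases hc : c = k
          · subst hc
            have hpre : [c].isPrefixOf (c :: t) = true := by
              simp [List.isPrefixOf]
            rw [PySem.Chars.replace.go]
            simp only [hpre, if_true]
            rw [show List.drop [c].length (c :: t) = t from rfl]
            rw [ih t (v.reverse ++ acc) (by simpa using Nat.lt_succ_iff.mp (by simpa using h))]
            simp
          · have hpre : [k].isPrefixOf (c :: t) = false := by
              simp [List.isPrefixOf]
              exact fun h' => (hc h'.symm).elim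
            rw [PySem.Chars.replace.go]
            simp only [hpre, Bool.false_eq_true, if_false]
            rw [ih t (c :: acc) (by simpa using Nat.lt_succ_iff.mp (by simpa using h))]
            simp [hc]

lemma qso_replace_single (k : Char) (v l : List Char) :
    PySem.Chars.replace l [k] v = l.flatMap (fun c => if c = k then v else [c]) := by
  rw [PySem.Chars.replace]
  simp only [List.isEmpty, Bool.false_eq_true, if_false]
  simpa using qso_go_single k v l.length l [] (le_refl _)

-- the seven escapes fused per character equal qsoEsc
lemma qso_chain_eq (c : Char) :
    ((((((((if c = '\\' then ['\\','\\'] else [c]).flatMap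
      (fun c => if c = Char.ofNat 0 then ['\\','0'] else [c])).flatMap
      (fun c => if c = '\n' then ['\\','n'] else [c])).flatMap
      (fun c => if c = '\r' then ['\\','r'] else [c])).flatMap
      (fun c => if c = '\'' then ['\\','\''] else [c])).flatMap
      (fun c => if c = '"' then ['\\','"'] else [c])).flatMap
      (fun c => if c = Char.ofNat 26 then ['\\','Z'] else [c]))) = qsoEsc c := by
  by_cases h1 : c = '\\'
  · subst h1; decide
  by_cases h2 : c = Char.ofNat 0
  · subst h2; decide
  by_cases h3 : c = '\n'
  · subst h3; decide
  by_cases h4 : c = '\r'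
  · subst h4; decide
  by_cases h5 : c = '\''
  · subst h5; decide
  by_cases h6 : c = '"'
  · subst h6; decide
  by_cases h7 : c = Char.ofNat 26
  · subst h7; decide
  simp [qsoEsc, h1, h2, h3, h4, h5, h6, h7]

-- the seven passes over a whole list fuse into one flatMap of qsoEsc
lemma qso_flatMap7 (l : List Char) :
    ((((((l.flatMap (fun c => if c = '\\' then ['\\','\\'] else [c])).flatMap
      (fun c => if c = Char.ofNat 0 then ['\\','0'] else [c])).flatMap
      (fun c => if c = '\n' then ['\\','n'] else [c])).flatMap
      (fun c => if c = '\r' then ['\\','r'] else [c])).flatMap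
      (fun c => if c = '\'' then ['\\','\''] else [c])).flatMap
      (fun c => if c = '"' then ['\\','"'] else [c])).flatMap
      (fun c => if c = Char.ofNat 26 then ['\\','Z'] else [c])
    = l.flatMap qsoEsc := by
  induction l with
  | nil => simp
  | cons c t ih =>
      simp only [List.flatMap_cons, List.flatMap_append]
      rw [ih, qso_chain_eq c]

lemma qso_A_toList (value : String) :
    (quote_string_offline value).toList = '\'' :: value.toList.flatMap qsoEsc ++ ['\''] := by
  have hitems : PySem.Dict.items qsoDictA
      = [ ("\\", "\\\\")
        , (String.ofList [Char.ofNat 0], "\\0")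
        , ("\n", "\\n")
        , ("\r", "\\r")
        , ("'", "\\'")
        , ("\"", "\\\"")
        , (String.ofList [Char.ofNat 26], "\\Z") ] := by decide
  rw [quote_string_offline]
  simp only [hitems, List.foldl]
  rw [String.toList_append, String.toList_append]
  simp only [PySem.Str.toList_replace]
  rw [show ("\\" : String).toList = ['\\'] from by decide]
  rw [show (String.ofList [Char.ofNat 0]).toList = [Char.ofNat 0] from by decide]
  rw [show ("\n" : String).toList = ['\n'] from by decide]
  rw [show ("\r" : String).toList = ['\r'] from by decide]
  rw [show ("'" : String).toList = ['\''] from by decide]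
  rw [show ("\"" : String).toList = ['"'] from by decide]
  rw [show (String.ofList [Char.ofNat 26]).toList = [Char.ofNat 26] from by decide]
  rw [show ("\\\\" : String).toList = ['\\','\\'] from by decide]
  rw [show ("\\0" : String).toList = ['\\','0'] from by decide]
  rw [show ("\\n" : String).toList = ['\\','n'] from by decide]
  rw [show ("\\r" : String).toList = ['\\','r'] from by decide]
  rw [show ("\\'" : String).toList = ['\\','\''] from by decide]
  rw [show ("\\\"" : String).toList = ['\\','"'] from by decide]
  rw [show ("\\Z" : String).toList = ['\\','Z'] from by decide]
  simp only [qso_replace_single]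
  rw [qso_flatMap7]
  simp

lemma qso_B_char (c : Char) :
    ((PySem.Dict.get? qsoDictB c).getD (String.ofList [c])).toList = qsoEsc c := by
  by_cases h1 : c = '\\'
  · subst h1; decide
  by_cases h2 : c = Char.ofNat 0
  · subst h2; decide
  by_cases h3 : c = '\n'
  · subst h3; decide
  by_cases h4 : c = '\r'
  · subst h4; decide
  by_cases h5 : c = '\''
  · subst h5; decide
  by_cases h6 : c = '"'
  · subst h6; decide
  by_cases h7 : c = Char.ofNat 26
  · subst h7; decide
  have hget : PySem.Dict.get? qsoDictB c = none := by
    have hitems : PySem.Dict.items qsoDictB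
        = [ ('\\', "\\\\"), (Char.ofNat 0, "\\0"), ('\n', "\\n"), ('\r', "\\r")
          , ('\'', "\\'"), ('"', "\\\""), (Char.ofNat 26, "\\Z") ] := by decide
    have b1 : ('\\' == c) = false := beq_eq_false_iff_ne.mpr (Ne.symm h1)
    have b2 : (Char.ofNat 0 == c) = false := beq_eq_false_iff_ne.mpr (Ne.symm h2)
    have b3 : ('\n' == c) = false := beq_eq_false_iff_ne.mpr (Ne.symm h3)
    have b4 : ('\r' == c) = false := beq_eq_false_iff_ne.mpr (Ne.symm h4)
    have b5 : ('\'' == c) = false := beq_eq_false_iff_ne.mpr (Ne.symm h5)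
    have b6 : ('"' == c) = false := beq_eq_false_iff_ne.mpr (Ne.symm h6)
    have b7 : (Char.ofNat 26 == c) = false := beq_eq_false_iff_ne.mpr (Ne.symm h7)
    rw [PySem.Dict.get?, hitems]
    simp [List.find?, b1, b2, b3, b4, b5, b6, b7]
  rw [hget]
  simp [qsoEsc, h1, h2, h3, h4, h5, h6, h7]

lemma qso_intersperse_nil_flatten (L : List (List Char)) :
    (List.intersperse ([] : List Char) L).flatten = L.flatten := by
  induction L with
  | nil => rfl
  | cons a l ih =>
      cases l with
      | nil => rfl
      | cons b t =>
          simp only [List.intersperse] at ih ⊢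
          simp [ih]

lemma qso_B_toList (value : String) :
    (quote_string_offline_alt value).toList = '\'' :: value.toList.flatMap qsoEsc ++ ['\''] := by
  rw [quote_string_offline_alt]
  rw [String.toList_append, String.toList_append]
  rw [PySem.Str.toList_join]
  rw [show ("" : String).toList = [] from by decide]
  rw [show ("'" : String).toList = ['\''] from by decide]
  rw [PySem.Chars.join, List.map_map]
  have hmap : (value.toList.map
      (String.toList ∘ fun ch => (PySem.Dict.get? qsoDictB ch).getD (String.ofList [ch])))
      = value.toList.map qsoEsc := by
    apply List.map_congr_left
    intro c _
    exact qso_B_char c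
  rw [hmap, List.intercalate, qso_intersperse_nil_flatten, List.flatMap_def]
  simp

-- ===== VERDICT (by name: the statement is the Claim_ definition above) =====
theorem quote_string_offline_spec : Claim_equal_quote_string_offline := by
  intro value _
  unfold Spec_quote_string_offline
  apply String.toList_inj.mp
  rw [qso_A_toList, qso_B_toList]
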